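-- pv_equiv track=rewrite | github.com/kaisjessa/Project-Euler | pe132.py | R_modulo
-- ===== SOURCE A (Python) =====
-- def R_modulo(k, p):
--     if(10 % p == 0):
--         return 1
--     digits = [1]
--     for i in range(1, p):
--         rem = (digits[i-1] * 10) % p
--         if(rem == 1):
--             break
--         digits.append((digits[i-1] * 10) % p)
--     period = i
--     remaining = digits[:k % period]
--     total = sum(remaining) % p
--     total += sum(digits) * (k // period)
--     total %= p
--     return(total)
-- ===== SOURCE B (Python) =====
-- def R_modulo(k, p):
--     # Repunit R(k) = (10**k - 1) // 9 modulo p.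
--     # Every repunit ends in the digit 1, so R(k) % p == 1 whenever p divides 10;
--     # otherwise use the closed form (10**k - 1) / 9 via modular exponentiation mod 9*p.
--     if 10 % p == 0:
--         return 1
--     return (pow(10, k, 9 * p) - 1) // 9 % p
-- ===== Notes on version B (the rewrite author's own statement) =====
-- stated objective: alternative
-- what changed: A scans up to p residues to find the period of 10 mod p and sums the digit cycle; B computes the repunit residue in closed form as (pow(10, k, 9*p) - 1) // 9 % p by modular exponentiation (plus the guard: repunits end in 1 when p divides 10); …
-- outside the precondition, e.g. on R_modulo(4, 4): A returns 0, B returns 3; on R_modulo(3, 4): A returns 3, B returns 3; on R_modulo(-1, 4): A returns 0, B raises ValueError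
import Mathlib
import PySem

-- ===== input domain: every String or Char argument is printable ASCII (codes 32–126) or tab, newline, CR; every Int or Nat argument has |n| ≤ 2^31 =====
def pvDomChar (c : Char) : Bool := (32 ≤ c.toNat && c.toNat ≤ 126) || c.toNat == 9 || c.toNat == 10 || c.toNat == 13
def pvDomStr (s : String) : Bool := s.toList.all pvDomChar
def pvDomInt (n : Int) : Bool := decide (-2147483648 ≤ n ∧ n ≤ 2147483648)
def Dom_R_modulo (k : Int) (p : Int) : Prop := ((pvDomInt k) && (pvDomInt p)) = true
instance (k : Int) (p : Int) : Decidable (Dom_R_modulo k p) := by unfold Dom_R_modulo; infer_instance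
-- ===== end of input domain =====

-- B computes the repunit residue R(k) = (10^k - 1) / 9 mod p in closed form by modular
-- exponentiation, as (pow(10, k, 9p) - 1) // 9 % p, instead of A's scan of the residue cycle.

-- ===== PORT A =====
-- One iteration of A's loop body 'for i in range(1, p): … break', folded over range(1, p):
-- the Bool records whether 'break' has happened (later iterations are then skipped), the Int
-- is Python's loop variable i, which survives the loop (period = i).  The accumulator holds
-- 'digits' REVERSED, so that Python's O(1) append is cons and digits[i-1] — always the
-- element appended last — is its head; the list is put back in order after the loop.
def aStep (p : Int) (st : List Int × Int × Bool) (i' : Int) : List Int × Int × Bool :=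
  match st with
  | (digitsRev, i, broke) =>
      if broke then (digitsRev, i, broke)
      else
        let prev := digitsRev.headD 0   -- digits[i-1]
        if PySem.Int.mod (prev * 10) p = 1 then (digitsRev, i', true)
        else (PySem.Int.mod (prev * 10) p :: digitsRev, i', false)

def R_modulo (k : Int) (p : Int) : Int :=
  if PySem.Int.mod 10 p = 0 then 1
  else
    let st := (PySem.List.pyRange 1 p 1).foldl (aStep p) ([1], 0, false)   -- i is unbound before the loop; Pre_ guarantees ≥ 1 iteration
    let digits := st.1.reverse
    let period := st.2.1
    let remaining := PySem.List.slice digits none (some (PySem.Int.mod k period))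
    let total := PySem.Int.mod (remaining.foldl (· + ·) 0) p   -- sum(remaining); foldl is Python's left-to-right sum
    let total2 := total + digits.foldl (· + ·) 0 * (PySem.Int.floordiv k period)
    PySem.Int.mod total2 p

-- ===== PORT B =====
-- Source B: a guard (repunits end in 1, so R(k) % p == 1 when p divides 10) and otherwise the
-- closed form '(pow(10, k, 9 * p) - 1) // 9 % p'.  Python's builtin pow(b, e, m) is
-- PySem.Int.powMod for e ≥ 0; for e < 0 Python inverts b modulo m (the Bézout coefficient,
-- here Mathlib's Int.gcdA, reduced mod m) and raises the inverse to -e — exact wherever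
-- Python's pow returns (it raises ValueError when gcd(10, 9p) ≠ 1, outside Pre_).
def R_modulo_alt (k : Int) (p : Int) : Int :=
  if PySem.Int.mod 10 p = 0 then 1
  else
    PySem.Int.mod (PySem.Int.floordiv
      ((if 0 ≤ k then PySem.Int.powMod 10 k.toNat (9 * p)
        else PySem.Int.powMod (PySem.Int.mod (Int.gcdA 10 (9 * p)) (9 * p)) (-k).toNat (9 * p))
        - 1) 9) p

-- ===== PRECONDITION & SPEC =====
-- Pre_ restricts to the task's natural domain: p ≥ 1 coprime to 10 (the Project Euler 132
-- setting, where the repunit residues are periodic), or p dividing 10 (every repunit ends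
-- in 1).  It excludes p = 0 and negative p not dividing 10, where A raises
-- (ZeroDivisionError / UnboundLocalError), and p ≥ 1 sharing exactly one factor with 10,
-- where no repunit period exists: A's break can never fire and its value comes from a
-- spurious period p - 1, while B computes the plain residue or, for k < 0, raises
-- ValueError (10 has no inverse there).
def Pre_R_modulo (k : Int) (p : Int) : Prop :=
  (1 ≤ p ∧ PySem.Int.mod p 2 ≠ 0 ∧ PySem.Int.mod p 5 ≠ 0) ∨
    (p ≠ 0 ∧ PySem.Int.mod 10 p = 0)
instance (k : Int) (p : Int) : Decidable (Pre_R_modulo k p) := by unfold Pre_R_modulo; infer_instance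

def pvWitness_R_modulo : Int × Int := (3, 7)

def Spec_R_modulo (k : Int) (p : Int) (out : Int) : Prop := out = R_modulo_alt k p
instance (k : Int) (p : Int) (out : Int) : Decidable (Spec_R_modulo k p out) := by unfold Spec_R_modulo; infer_instance

-- ===== CLAIM (what is proved, stated in full; the proofs are below) =====
def Claim_equal_R_modulo : Prop := ∀ (k : Int) (p : Int), Dom_R_modulo k p → Pre_R_modulo k p → Spec_R_modulo k p (R_modulo k p)

-- ===== LEMMAS AND PROOFS =====

-- the list A's loop builds: the first n powers of 10 reduced mod p
def digitsF (p : Int) (n : Nat) : List Int := (List.range n).map (fun i => (10:Int) ^ i % p)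

-- the integer repunit with n digits, as the geometric sum A's 'digits' tracks mod p
def repu (n : Nat) : Int := ((List.range n).map (fun i => (10:Int) ^ i)).sum

lemma nine_rep (n : Nat) : 9 * repu n = 10 ^ n - 1 := by
  induction n with
  | zero => simp [repu]
  | succ m ih =>
      simp only [repu, List.range_succ, List.map_append, List.sum_append, List.map_cons,
        List.sum_cons, List.map_nil, List.sum_nil] at *
      rw [pow_succ]
      ring_nf
      ring_nf at ih
      omega

lemma rep_split (a b : Nat) : repu (a + b) = repu a + 10 ^ a * repu b := by
  induction b with
  | zero => simp [repu]
  | succ c ih =>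
      rw [← Nat.add_assoc]
      simp only [repu, List.range_succ, List.map_append, List.sum_append, List.map_cons,
        List.sum_cons, List.map_nil, List.sum_nil] at *
      rw [ih, pow_add]
      ring

lemma rep_mul {p : Int} {d : Nat} (hd : p ∣ 10 ^ d - 1) (t : Nat) :
    p ∣ repu (t * d) - t * repu d := by
  induction t with
  | zero => simp [repu]
  | succ s ih =>
      have hsplit : repu ((s + 1) * d) = repu (s * d) + 10 ^ (s * d) * repu d := by
        rw [add_mul, one_mul, rep_split]
      have hdvd : p ∣ (10:Int) ^ (s * d) - 1 :=
        hd.trans (by simpa [mul_comm s d, pow_mul] using sub_one_dvd_pow_sub_one ((10:Int) ^ d) s)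
      have : repu ((s+1) * d) - (s+1 : Nat) * repu d
           = (repu (s * d) - s * repu d) + ((10:Int) ^ (s * d) - 1) * repu d := by
        rw [hsplit]; push_cast; ring
      rw [this]
      exact dvd_add ih (Dvd.dvd.mul_right hdvd _)

-- B's port in closed form: the repunit residue
lemma alt_eq {p : Int} (hp : 0 < p) (h10 : PySem.Int.mod 10 p ≠ 0) {k : Int} (hk : 0 ≤ k) :
    R_modulo_alt k p = repu k.toNat % p := by
  have h9p : (0:Int) < 9 * p := by omega
  unfold R_modulo_alt
  rw [if_neg h10, if_pos hk, PySem.Int.powMod_eq, PySem.Int.mod_eq_emod_of_pos h9p]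
  set n := k.toNat with hn
  set t := (10:Int) ^ n / (9 * p) with ht
  have hdm : 9 * p * t + (10:Int) ^ n % (9 * p) = 10 ^ n := Int.mul_ediv_add_emod _ _
  have h9 := nine_rep n
  have hr1 : (10:Int) ^ n % (9 * p) - 1 = 9 * (repu n - p * t) := by linarith
  rw [hr1, PySem.Int.floordiv_eq_ediv_of_pos (by norm_num : (0:Int) < 9),
    Int.mul_ediv_cancel_left _ (by norm_num : (9:Int) ≠ 0),
    PySem.Int.mod_eq_emod_of_pos hp, sub_eq_add_neg, ← mul_neg,
    mul_comm p (-t), ← Int.add_mul_emod_self_left (repu n) p (-t)]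
  rw [mul_comm (-t) p]

lemma sum_digitsF {p : Int} (n : Nat) : (digitsF p n).sum % p = repu n % p := by
  induction n with
  | zero => simp [digitsF, repu]
  | succ m ih =>
      simp only [digitsF, repu, List.range_succ, List.map_append, List.sum_append,
        List.map_cons, List.sum_cons, List.map_nil, List.sum_nil] at *
      conv_lhs => rw [Int.add_emod, ih, Int.add_emod (10^m % p), Int.emod_emod_of_dvd _ dvd_rfl]
      conv_rhs => rw [Int.add_emod]
      simp [Int.emod_emod_of_dvd]

lemma take_digitsF (p : Int) {m n : Nat} (h : m ≤ n) :
    (digitsF p n).take m = digitsF p m := by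
  simp [digitsF, ← List.map_take, List.take_range, Nat.min_eq_left h]

lemma digitsF_snoc (p : Int) (j : Nat) :
    digitsF p j ++ [(10:Int) ^ j % p] = digitsF p (j+1) := by
  simp [digitsF, List.range_succ]

lemma prev_eq {p : Int} {j : Nat} (hj : 1 ≤ j) :
    (digitsF p j).reverse.headD 0 = 10 ^ (j-1) % p := by
  have h : j = (j - 1) + 1 := by omega
  rw [h, ← digitsF_snoc]
  simp

lemma rem_eq {p : Int} (hp : 0 < p) {j : Nat} (hj : 1 ≤ j) :
    PySem.Int.mod ((10:Int) ^ (j-1) % p * 10) p = 10 ^ j % p := by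
  rw [PySem.Int.mod_eq_emod_of_pos hp, Int.mul_emod, Int.emod_emod_of_dvd _ dvd_rfl,
    ← Int.mul_emod, ← pow_succ]
  congr 2
  omega

lemma foldl_done (p : Int) (l : List Int) (digitsRev : List Int) (i : Int) :
    l.foldl (aStep p) (digitsRev, i, true) = (digitsRev, i, true) := by
  induction l with
  | nil => rfl
  | cons x xs ih => simpa [aStep] using ih

lemma aGo_break {p : Int} (hp : 3 ≤ p) {d : Nat} (hd1 : 1 ≤ d) (hdp : (d:Int) ≤ p - 1)
    (hbrk : (10:Int) ^ d % p = 1) (hmin : ∀ t : Nat, 1 ≤ t → t < d → (10:Int) ^ t % p ≠ 1)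
    (j : Nat) (hj : 1 ≤ j) (hjd : j ≤ d) :
    (PySem.List.pyRange (j:Int) p 1).foldl (aStep p) ((digitsF p j).reverse, (j:Int) - 1, false)
      = ((digitsF p d).reverse, (d:Int), true) := by
  have hjp : (j:Int) < p := by omega
  rw [PySem.List.pyRange_one_cons hjp]
  simp only [List.foldl_cons, aStep, Bool.false_eq_true, if_false, prev_eq hj,
    rem_eq (by omega : (0:Int) < p) hj]
  by_cases he : j = d
  · subst he
    simp only [hbrk, if_pos]
    exact foldl_done p _ _ _
  · have hne := hmin j hj (by omega)
    simp only [hne, if_false]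
    rw [show (10:Int) ^ j % p :: (digitsF p j).reverse = (digitsF p (j+1)).reverse by
      rw [← digitsF_snoc]; simp]
    have h1 : (j:Int) + 1 = ((j+1 : Nat) : Int) := by omega
    have h2 : (j:Int) = ((j+1 : Nat) : Int) - 1 := by omega
    rw [h1, h2]
    exact aGo_break hp hd1 hdp hbrk hmin (j+1) (by omega) (by omega)
termination_by d - j

lemma euler_exists {p : Int} (hp3 : 3 ≤ p) (h2 : ¬ (2:Int) ∣ p) (h5 : ¬ (5:Int) ∣ p) :
    ∃ t:Nat, 1 ≤ t ∧ (t:Int) ≤ p - 1 ∧ (10:Int)^t % p = 1 := by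
  have hpn : ((p.toNat : Nat) : Int) = p := by omega
  set n := p.toNat with hn
  have hc2 : Nat.Coprime 2 n :=
    (Nat.prime_two.coprime_iff_not_dvd).2 (fun h => h2 (by rw [← hpn]; exact_mod_cast Int.natCast_dvd_natCast.2 h))
  have hc5 : Nat.Coprime 5 n :=
    ((Nat.prime_five).coprime_iff_not_dvd).2 (fun h => h5 (by rw [← hpn]; exact_mod_cast Int.natCast_dvd_natCast.2 h))
  have hc : Nat.Coprime 10 n := by
    rw [show (10:Nat) = 2 * 5 by norm_num, Nat.coprime_mul_iff_left]
    exact ⟨hc2, hc5⟩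
  refine ⟨Nat.totient n, Nat.totient_pos.2 (by omega), ?_, ?_⟩
  · have := Nat.totient_lt n (by omega)
    omega
  · have he : (10:Nat)^(Nat.totient n) % n = 1 % n := Nat.ModEq.pow_totient hc
    have h1 : (1:Nat) % n = 1 := Nat.mod_eq_of_lt (by omega)
    have hcast := congrArg (Nat.cast : Nat → Int) (he.trans h1)
    push_cast at hcast
    rw [hpn] at hcast
    exact hcast

lemma digitsF_one {p : Int} (hp : 1 < p) : digitsF p 1 = [1] := by
  simp [digitsF, Int.emod_eq_of_lt (by norm_num : (0:Int) ≤ 1) hp]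

lemma nine_dvd (a : Nat) : (9:Int) ∣ 10 ^ a - 1 := by
  simpa using (((by decide : (10:Int) ≡ 1 [ZMOD 9]).pow a).symm).dvd

-- ===== VERDICT (by name: the statement is the Claim_ definition above) =====
theorem R_modulo_spec : Claim_equal_R_modulo := by
  intro k p _dom hpre
  rcases hpre with ⟨hp1, h2, h5⟩ | ⟨hp0', h10⟩
  · by_cases h10 : PySem.Int.mod 10 p = 0
    · -- p ≥ 1, coprime to 10 and dividing 10: only p = 1; both branches return 1
      have hd : p ∣ 10 := (PySem.Int.mod_eq_zero_iff_dvd 10 p).1 h10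
      have hle : p ≤ 10 := Int.le_of_dvd (by norm_num) hd
      have hp1' : p = 1 := by
        interval_cases p <;> first
          | rfl
          | exact absurd (by decide) h2
          | exact absurd (by decide) h5
          | exact absurd hd (by decide)
      subst hp1'
      simp [Spec_R_modulo, R_modulo, R_modulo_alt]
    · -- p coprime to 10, p ≥ 3: A's loop breaks at the multiplicative order d of 10 mod p
      have hp3 : 3 ≤ p := by
        rcases (by omega : p = 1 ∨ p = 2 ∨ 3 ≤ p) with h | h | h
        · exact absurd (h ▸ (by decide : PySem.Int.mod (10:Int) 1 = 0)) h10
        · exact absurd (h ▸ (by decide : PySem.Int.mod (2:Int) 2 = 0)) h2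
        · exact h
      have hp0 : (0:Int) < p := by omega
      have h2' : ¬ (2:Int) ∣ p := fun h => h2 ((PySem.Int.mod_eq_zero_iff_dvd p 2).2 h)
      have h5' : ¬ (5:Int) ∣ p := fun h => h5 ((PySem.Int.mod_eq_zero_iff_dvd p 5).2 h)
      unfold Spec_R_modulo R_modulo
      rw [if_neg h10]
      have hbrk : ∃ t:Nat, 1 ≤ t ∧ (t:Int) ≤ p - 1 ∧ (10:Int)^t % p = 1 :=
        euler_exists hp3 h2' h5'
      classical
      obtain ⟨hd1, hdp, hbd⟩ := Nat.find_spec hbrk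
      set d := Nat.find hbrk with hdDef
      have hmin : ∀ t : Nat, 1 ≤ t → t < d → (10:Int)^t % p ≠ 1 := by
        intro t h1 h2 hbad
        exact Nat.find_min hbrk h2 ⟨h1, by omega, hbad⟩
      have hloop := aGo_break hp3 hd1 hdp hbd hmin 1 le_rfl hd1
      rw [digitsF_one (by omega)] at hloop
      simp only [List.reverse_singleton] at hloop
      push_cast at hloop
      rw [hloop]
      dsimp only
      rw [List.reverse_reverse, ← List.sum_eq_foldl, ← List.sum_eq_foldl]
      have hdpos : (0:Int) < (d:Int) := by exact_mod_cast hd1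
      have hPdvd : p ∣ (10:Int)^d - 1 := by
        have hde := Int.mul_ediv_add_emod ((10:Int)^d) p
        exact ⟨(10:Int)^d / p, by omega⟩
      set m := PySem.Int.mod k (d:Int) with hmDef
      have hm0 : 0 ≤ m := PySem.Int.mod_nonneg k hdpos
      have hmlt : m < d := PySem.Int.mod_lt k hdpos
      rw [PySem.List.slice_to _ hm0, take_digitsF p (by omega : m.toNat ≤ d),
        PySem.Int.mod_eq_emod_of_pos hp0, PySem.Int.mod_eq_emod_of_pos hp0, sum_digitsF,
        PySem.Int.floordiv_eq_ediv_of_pos hdpos]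
      set q := k / (d:Int) with hqDef
      have hmE : m = k % (d:Int) := PySem.Int.mod_eq_emod_of_pos hdpos
      have hid : (d:Int) * q + m = k := by rw [hmE, hqDef]; exact Int.mul_ediv_add_emod k d
      have hS : Int.ModEq p (digitsF p d).sum (repu d) := sum_digitsF (p := p) d
      have hA : repu m.toNat % p + (digitsF p d).sum * q ≡ repu m.toNat + repu d * q [ZMOD p] :=
        Int.ModEq.add (Int.emod_emod_of_dvd _ dvd_rfl) (hS.mul_right q)
      by_cases hk0 : 0 ≤ k
      · -- k ≥ 0: B is the canonical residue of the integer repunit R(k)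
        rw [alt_eq hp0 h10 hk0]
        have hq0 : 0 ≤ q := Int.ediv_nonneg hk0 (le_of_lt hdpos)
        have hMq : ((q.toNat : Nat) : Int) = q := Int.toNat_of_nonneg hq0
        have hkn : k.toNat = q.toNat * d + m.toNat := by
          have hcast : ((q.toNat * d + m.toNat : Nat) : Int) = k := by
            push_cast
            rw [hMq, Int.toNat_of_nonneg hm0]
            linear_combination hid
          omega
        have hdvd1 : p ∣ repu (q.toNat * d) - (q.toNat : Int) * repu d := rep_mul hPdvd q.toNat
        have hpowmul : (10:Int)^(q.toNat * d) = ((10:Int)^d)^q.toNat := by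
          rw [mul_comm, pow_mul]
        have hdvd2 : p ∣ (10:Int)^(q.toNat * d) - 1 :=
          hPdvd.trans (hpowmul ▸ sub_one_dvd_pow_sub_one ((10:Int)^d) q.toNat)
        have key : p ∣ repu k.toNat - (repu m.toNat + repu d * q) := by
          rw [hkn, rep_split]
          have hdec : repu (q.toNat * d) + 10 ^ (q.toNat * d) * repu m.toNat
                - (repu m.toNat + repu d * q)
              = (repu (q.toNat * d) - (q.toNat : Int) * repu d)
                + ((10:Int) ^ (q.toNat * d) - 1) * repu m.toNat := by
            rw [hMq]
            ring
          rw [hdec]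
          exact dvd_add hdvd1 (hdvd2.mul_right _)
        have hB : repu m.toNat + repu d * q ≡ repu k.toNat [ZMOD p] :=
          (Int.modEq_iff_dvd.2 (by simpa using key))
        exact hA.trans hB
      · -- k < 0: Python's pow raises 10⁻¹ mod 9p to the n = -k; A's periodic
        -- extrapolation computes the same residue
        have hq1 : q ≤ -1 := by
          by_contra hq
          push Not at hq
          have := mul_nonneg (le_of_lt hdpos) (by omega : (0:Int) ≤ q)
          omega
        set n : Nat := (-k).toNat with hnDef
        have hn1 : 1 ≤ n := by omega
        set Q : Nat := (-q).toNat with hQDef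
        have hQint : (Q:Int) = -q := Int.toNat_of_nonneg (by omega)
        have hQd : m.toNat + n = Q * d := by
          have hcast : ((m.toNat + n : Nat) : Int) = ((Q * d : Nat) : Int) := by
            push_cast
            rw [Int.toNat_of_nonneg hm0, hnDef, Int.toNat_of_nonneg (by omega : (0:Int) ≤ -k),
              hQint]
            linear_combination hid
          exact_mod_cast hcast
        have hm9 : (0:Int) < 9 * p := by omega
        have hcop : IsCoprime (10:Int) (9*p) := by
          have c2 : IsCoprime (2:Int) (9*p) :=
            ((Int.prime_two).coprime_iff_not_dvd).mpr
              (fun ⟨c, hc⟩ => h2' ⟨c - 4*p, by omega⟩)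
          have c5 : IsCoprime (5:Int) (9*p) :=
            (((by norm_num : Prime (5:Int))).coprime_iff_not_dvd).mpr
              (fun ⟨c, hc⟩ => h5' ⟨4*c - 7*p, by omega⟩)
          simpa [show (10:Int) = 2 * 5 by norm_num] using c2.mul_left c5
        have hgcd : Int.gcd 10 (9*p) = 1 := Int.isCoprime_iff_gcd_eq_one.mp hcop
        have hbez : (1:Int) = 10 * Int.gcdA 10 (9*p) + (9*p) * Int.gcdB 10 (9*p) := by
          have h := Int.gcd_eq_gcd_ab 10 (9*p)
          rw [hgcd] at h
          exact_mod_cast h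
        unfold R_modulo_alt
        rw [if_neg h10, if_neg hk0]
        set g := PySem.Int.mod (Int.gcdA 10 (9 * p)) (9 * p) with hgDef
        rw [PySem.Int.powMod_eq, PySem.Int.mod_eq_emod_of_pos hm9]
        have hg : g ≡ Int.gcdA 10 (9*p) [ZMOD 9*p] := by
          rw [hgDef, PySem.Int.mod_eq_emod_of_pos hm9]
          exact Int.emod_emod_of_dvd _ dvd_rfl
        have hginv : g * 10 ≡ 1 [ZMOD 9*p] := by
          have h1 : Int.gcdA 10 (9*p) * 10 ≡ 1 [ZMOD 9*p] :=
            Int.modEq_iff_dvd.2 ⟨Int.gcdB 10 (9*p), by linarith⟩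
          exact (hg.mul_right 10).trans h1
        set X := g ^ (-k).toNat % (9 * p) with hXDef
        have hXmod : X ≡ g ^ n [ZMOD 9*p] := by
          rw [hXDef, hnDef]
          exact Int.emod_emod_of_dvd _ dvd_rfl
        have hginvn : g ^ n * 10 ^ n ≡ 1 [ZMOD 9*p] := by
          have h := hginv.pow n
          simpa [mul_pow] using h
        have hXinv : X * 10 ^ n ≡ 1 [ZMOD 9*p] := (hXmod.mul_right _).trans hginvn
        have hL : ((10:Int) ^ m.toNat + (10 ^ d - 1) * q) * 10 ^ n - 1
            = (10 ^ d - 1) * (∑ i ∈ Finset.range Q, ((10:Int) ^ (d * i) - 10 ^ n)) := by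
          have hgeo : (∑ i ∈ Finset.range Q, (10:Int) ^ (d*i)) * ((10:Int)^d - 1)
              = 10 ^ (d*Q) - 1 := by
            simpa [pow_mul] using geom_sum_mul ((10:Int)^d) Q
          have hps : (10:Int) ^ m.toNat * 10 ^ n = 10 ^ (d * Q) := by
            rw [← pow_add, hQd, mul_comm]
          rw [Finset.sum_sub_distrib, Finset.sum_const, Finset.card_range, nsmul_eq_mul]
          linear_combination hps - hgeo + ((10:Int)^d - 1) * 10 ^ n * hQint
        have h9S : (9:Int) ∣ ∑ i ∈ Finset.range Q, ((10:Int) ^ (d * i) - 10 ^ n) :=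
          Finset.dvd_sum (fun i _ => by
            simpa using dvd_sub (nine_dvd (d*i)) (nine_dvd n))
        have hkey : (9*p) ∣ ((10:Int) ^ m.toNat + (10 ^ d - 1) * q) * 10 ^ n - 1 := by
          rw [hL]
          obtain ⟨u, hu⟩ := hPdvd
          obtain ⟨v, hv⟩ := h9S
          exact ⟨u * v, by rw [hu, hv]; ring⟩
        have hLX : (9*p) ∣ ((10:Int) ^ m.toNat + (10 ^ d - 1) * q) - X := by
          have hx1 : (9*p) ∣ (X * 10 ^ n - 1) := by
            simpa using (dvd_neg.mpr hXinv.dvd)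
          have hmul : (((10:Int) ^ m.toNat + (10 ^ d - 1) * q) - X) * 10 ^ n
              = (((10:Int) ^ m.toNat + (10 ^ d - 1) * q) * 10 ^ n - 1) - (X * 10 ^ n - 1) := by
            ring
          have h1 : (9*p) ∣ (((10:Int) ^ m.toNat + (10 ^ d - 1) * q) - X) * 10 ^ n := by
            rw [hmul]
            exact dvd_sub hkey hx1
          exact (IsCoprime.pow_right hcop.symm).dvd_of_dvd_mul_right h1
        have h9X : (9:Int) ∣ X - 1 := by
          have h1 : (9:Int) ∣ ((10:Int) ^ m.toNat + (10 ^ d - 1) * q) - X :=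
            dvd_trans ⟨p, rfl⟩ hLX
          have h2 : (9:Int) ∣ ((10:Int) ^ m.toNat + (10 ^ d - 1) * q) - 1 := by
            have h3 := dvd_add (nine_dvd m.toNat) ((nine_dvd d).mul_right q)
            rwa [show ((10:Int) ^ m.toNat - 1) + (10 ^ d - 1) * q
                = ((10:Int) ^ m.toNat + (10 ^ d - 1) * q) - 1 from by ring] at h3
          have h4 := dvd_sub h2 h1
          rwa [show (((10:Int) ^ m.toNat + (10 ^ d - 1) * q) - 1)
              - (((10:Int) ^ m.toNat + (10 ^ d - 1) * q) - X) = X - 1 from by ring] at h4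
        obtain ⟨y, hy⟩ := h9X
        rw [hy, PySem.Int.floordiv_eq_ediv_of_pos (by norm_num : (0:Int) < 9),
          Int.mul_ediv_cancel_left _ (by norm_num : (9:Int) ≠ 0),
          PySem.Int.mod_eq_emod_of_pos hp0]
        have h9eq : 9 * ((repu m.toNat + repu d * q) - y)
            = ((10:Int) ^ m.toNat + (10 ^ d - 1) * q) - X := by
          have e1 := nine_rep m.toNat
          have e2 := nine_rep d
          linear_combination e1 + q * e2 + hy
        have hyrep : p ∣ (repu m.toNat + repu d * q) - y := by
          obtain ⟨c, hc⟩ := hLX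
          refine ⟨c, ?_⟩
          have h9c : 9 * ((repu m.toNat + repu d * q) - y) = 9 * (p * c) := by
            rw [h9eq, hc]; ring
          exact mul_left_cancel₀ (by norm_num : (9:Int) ≠ 0) h9c
        have hB : repu m.toNat + repu d * q ≡ y [ZMOD p] :=
          Int.modEq_iff_dvd.2 (by simpa using dvd_neg.mpr hyrep)
        exact hA.trans hB
  · -- p divides 10 (p ≠ 0): A returns 1 from its first branch and so does B's guard
    simp [Spec_R_modulo, R_modulo, R_modulo_alt, h10]
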